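-- pv_equiv track=rewrite | github.com/spinje/pflow | src/pflow/runtime/template_validator.py | _is_valid_syntax
-- ===== SOURCE A (Python) =====
-- def _is_valid_syntax(template: str) -> bool:
--     """Check if template syntax is valid.
--
--     Validates:
--     - No double dots (..)
--     - No leading/trailing dots
--     - Valid identifier characters
--
--     Args:
--         template: Template variable name (without $)
--
--     Returns:
--         True if syntax is valid
--     """
--     # Check for empty template
--     if not template:
--         return False
--
--     # Check for double dots
--     if ".." in template:
--         return False
--
--     # Check for leading/trailing dots
--     if template.startswith(".") or template.endswith("."):
--         return False
--
--     # Check that all parts are valid identifiers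
--     parts = template.split(".")
--     for part in parts:
--         if not part:  # Empty part between dots
--             return False
--         # Check valid identifier characters (alphanumeric + underscore)
--         if not all(c.isalnum() or c == "_" for c in part):
--             return False
--         # Identifiers shouldn't start with a digit
--         if part[0].isdigit():
--             return False
--
--     return True
-- ===== SOURCE B (Python) =====
-- def _is_valid_syntax(template: str) -> bool:
--     """Single left-to-right scan with an at-segment-start flag (one pass, no split/substring scans)."""
--     at_segment_start = True
--     for c in template:
--         if c == ".":
--             if at_segment_start:
--                 return False
--             at_segment_start = True
--         elif c.isalnum() or c == "_":
--             if at_segment_start and c.isdigit():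
--                 return False
--             at_segment_start = False
--         else:
--             return False
--     return not at_segment_start
-- ===== Notes on version B (the rewrite author's own statement) =====
-- stated objective: simpler
-- what changed: Replaces the split-on-dot plus separate double-dot/leading/trailing-dot substring checks (multiple passes over the string) with a single left-to-right character scan maintaining an at_segment_start flag.
import Mathlib
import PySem

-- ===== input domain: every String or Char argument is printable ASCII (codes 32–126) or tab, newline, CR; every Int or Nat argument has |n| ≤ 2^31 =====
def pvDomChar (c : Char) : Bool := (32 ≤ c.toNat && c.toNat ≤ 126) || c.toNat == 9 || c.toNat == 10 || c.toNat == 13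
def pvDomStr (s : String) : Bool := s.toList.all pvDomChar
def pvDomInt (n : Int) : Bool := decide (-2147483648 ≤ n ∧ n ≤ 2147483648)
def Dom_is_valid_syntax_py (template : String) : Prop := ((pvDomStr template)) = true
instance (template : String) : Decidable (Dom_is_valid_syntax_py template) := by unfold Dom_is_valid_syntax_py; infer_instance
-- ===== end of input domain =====

-- B replaces A's split('.') plus separate '..'/leading/trailing-dot substring checks with one
-- left-to-right scan keeping an at_segment_start flag (objective: simpler, one pass).

-- ===== PORT A =====
-- the 'for part in parts' loop with its early returns (empty part / bad char / digit head)
def pvACheckParts : List (List Char) → Bool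
  | [] => true
  | p :: rest =>
    if p = [] then false
    else if !(p.all fun c => PySem.Chars.isalnum c || c == '_') then false
    else
      -- part[0]: p is non-empty here, so indexing is safe; matched structurally
      match p with
      | [] => false
      | c :: _ => if PySem.Chars.isdigit c then false else pvACheckParts rest

def is_valid_syntax_py (template : String) : Bool :=
  let l := template.toList
  if l = [] then false
  else if PySem.Chars.isIn ['.', '.'] l then false
  else if PySem.Chars.startswith l ['.'] || PySem.Chars.endswith l ['.'] then false
  else pvACheckParts (PySem.Chars.splitOn l ['.'])

-- ===== PORT B =====
-- the single scan; the Bool accumulator is Source B's at_segment_start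
def pvBScan : List Char → Bool → Bool
  | [], start => !start
  | c :: rest, start =>
    if c == '.' then
      if start then false else pvBScan rest true
    else if PySem.Chars.isalnum c || c == '_' then
      if start && PySem.Chars.isdigit c then false else pvBScan rest false
    else false

def is_valid_syntax_py_alt (template : String) : Bool :=
  pvBScan template.toList true

-- ===== PRECONDITION & SPEC =====
def Spec_is_valid_syntax_py (template : String) (out : Bool) : Prop := out = is_valid_syntax_py_alt template
instance (template : String) (out : Bool) : Decidable (Spec_is_valid_syntax_py template out) := by unfold Spec_is_valid_syntax_py; infer_instance

-- ===== CLAIM (what is proved, stated in full; the proofs are below) =====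
def Claim_equal_is_valid_syntax_py : Prop := ∀ (template : String), Dom_is_valid_syntax_py template → Spec_is_valid_syntax_py template (is_valid_syntax_py template)

-- ===== LEMMAS AND PROOFS =====

-- proof-side structural version of split('.')
def pvDSplit : List Char → List (List Char)
  | [] => [[]]
  | c :: rest =>
    if c = '.' then [] :: pvDSplit rest
    else (c :: (pvDSplit rest).headI) :: (pvDSplit rest).tail

theorem pvDSplit_ne_nil (l : List Char) : pvDSplit l ≠ [] := by
  cases l with
  | nil => simp [pvDSplit]
  | cons c rest => simp only [pvDSplit]; split <;> simp

theorem pvSplitOn_go_dot (fuel : Nat) :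
    ∀ (l cur : List Char) (acc : List (List Char)), l.length ≤ fuel →
      PySem.Chars.splitOn.go ['.'] fuel l cur acc =
        acc.reverse ++ (cur.reverse ++ (pvDSplit l).headI) :: (pvDSplit l).tail := by
  induction fuel with
  | zero =>
    intro l cur acc h
    have : l = [] := List.length_eq_zero_iff.mp (Nat.le_zero.mp h)
    subst this
    simp [PySem.Chars.splitOn.go, pvDSplit]
  | succ fuel ih =>
    intro l cur acc h
    cases l with
    | nil => simp [PySem.Chars.splitOn.go, pvDSplit]
    | cons c rest =>
      by_cases hc : c = '.'
      · subst hc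
        have : PySem.Chars.splitOn.go ['.'] (fuel+1) ('.'::rest) cur acc
            = PySem.Chars.splitOn.go ['.'] fuel rest [] ((cur.reverse) :: acc) := by
          simp [PySem.Chars.splitOn.go]
        rw [this, ih rest [] _ (by simpa using Nat.le_of_succ_le_succ h)]
        obtain ⟨p, ps, hps⟩ := List.exists_cons_of_ne_nil (pvDSplit_ne_nil rest)
        simp [pvDSplit, hps]
      · have : PySem.Chars.splitOn.go ['.'] (fuel+1) (c::rest) cur acc
            = PySem.Chars.splitOn.go ['.'] fuel rest (c :: cur) acc := by
          simp only [PySem.Chars.splitOn.go]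
          simp [List.isPrefixOf]
          intro h; exact absurd h.symm hc
        rw [this, ih rest (c :: cur) _ (by simpa using Nat.le_of_succ_le_succ h)]
        simp [pvDSplit, hc]

theorem pvSplitOn_eq_dsplit (l : List Char) :
    PySem.Chars.splitOn l ['.'] = pvDSplit l := by
  have := pvSplitOn_go_dot (l.length + 1) l [] [] (Nat.le_succ _)
  simp only [PySem.Chars.splitOn, this, List.reverse_nil, List.nil_append]
  obtain ⟨p, ps, hps⟩ := List.exists_cons_of_ne_nil (pvDSplit_ne_nil l)
  simp [hps]

-- a segment as A's per-part checks accept it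
def pvGoodPart : List Char → Bool
  | [] => false
  | c :: rest =>
    ((PySem.Chars.isalnum c || c == '_') && rest.all (fun d => PySem.Chars.isalnum d || d == '_'))
      && !PySem.Chars.isdigit c

theorem pvACheckParts_eq_all (ps : List (List Char)) :
    pvACheckParts ps = ps.all pvGoodPart := by
  induction ps with
  | nil => rfl
  | cons p rest ih =>
    cases p with
    | nil => simp [pvACheckParts, pvGoodPart]
    | cons c t =>
      cases h1 : (PySem.Chars.isalnum c || c == '_') <;>
      cases h2 : t.all (fun d => PySem.Chars.isalnum d || d == '_') <;>
      cases h3 : PySem.Chars.isdigit c <;>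
        simp [pvACheckParts, pvGoodPart, h1, h2, h3, ih]

-- the scan against the segment decomposition: start-of-segment and mid-segment invariants at once
theorem pvScan_dsplit (l : List Char) :
    pvBScan l true = (pvDSplit l).all pvGoodPart ∧
    pvBScan l false =
      ((pvDSplit l).headI.all (fun d => PySem.Chars.isalnum d || d == '_')
        && (pvDSplit l).tail.all pvGoodPart) := by
  induction l with
  | nil => simp [pvBScan, pvDSplit, pvGoodPart]
  | cons c rest ih =>
    obtain ⟨p, ps, hps⟩ := List.exists_cons_of_ne_nil (pvDSplit_ne_nil rest)
    rw [hps] at ih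
    by_cases hc : c = '.'
    · subst hc
      exact ⟨by simp [pvBScan, pvDSplit, pvGoodPart],
             by simp [pvBScan, pvDSplit, ih.1, hps]⟩
    · refine ⟨?_, ?_⟩ <;>
      cases h1 : (PySem.Chars.isalnum c || c == '_') <;>
      cases h3 : PySem.Chars.isdigit c <;>
        simp [pvBScan, pvDSplit, hps, pvGoodPart, hc, h1, h3, ih.2]

theorem pvScan_of_infix (l : List Char) (h : ['.', '.'] <:+: l) :
    ∀ st, pvBScan l st = false := by
  induction l with
  | nil => simp at h
  | cons c rest ih =>
    intro st
    rcases (List.infix_cons_iff.mp h) with hpre | hinf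
    · obtain ⟨t, ht⟩ := hpre
      cases rest with
      | nil => simp at ht
      | cons d r =>
        simp at ht
        obtain ⟨hc, hd, -⟩ := ht
        subst hc; subst hd
        cases st <;> simp [pvBScan]
    · cases st <;> simp [pvBScan, ih hinf]

theorem pvScan_of_getLast (l : List Char) (h : l.getLast? = some '.') :
    ∀ st, pvBScan l st = false := by
  induction l with
  | nil => simp at h
  | cons c rest ih =>
    intro st
    cases hr : rest with
    | nil =>
      subst hr
      simp at h
      subst h
      cases st <;> simp [pvBScan]
    | cons d r =>
      have hlast : rest.getLast? = some '.' := by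
        rw [hr] at h ⊢
        simpa [List.getLast?_cons_cons] using h
      rw [← hr] at *
      cases st <;> simp [pvBScan, ih hlast]

-- ===== VERDICT (by name: the statement is the Claim_ definition above) =====
theorem is_valid_syntax_py_spec : Claim_equal_is_valid_syntax_py := by
  intro template _
  unfold Spec_is_valid_syntax_py is_valid_syntax_py is_valid_syntax_py_alt
  set l := template.toList with hl
  simp only []
  by_cases h0 : l = []
  · simp [h0, pvBScan]
  · simp only [h0, if_false]
    by_cases h1 : PySem.Chars.isIn ['.', '.'] l = true
    · rw [PySem.Chars.isIn_iff_infix] at h1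
      simp [PySem.Chars.isIn_iff_infix, h1, pvScan_of_infix l h1]
    · simp only [h1, Bool.false_eq_true, if_false]
      by_cases h2 : (PySem.Chars.startswith l ['.'] || PySem.Chars.endswith l ['.']) = true
      · rcases Bool.or_eq_true_iff.mp h2 with hs | he
        · rw [PySem.Chars.startswith_iff] at hs
          obtain ⟨t, ht⟩ := hs
          simp only [h2, if_true]
          simp [← ht, pvBScan]
        · rw [PySem.Chars.endswith_iff] at he
          obtain ⟨t, ht⟩ := he
          have : l.getLast? = some '.' := by rw [← ht]; simp
          simp only [h2, if_true]
          simp [pvScan_of_getLast l this]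
      · simp only [h2, Bool.false_eq_true, if_false]
        rw [pvSplitOn_eq_dsplit, pvACheckParts_eq_all, (pvScan_dsplit l).1]
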